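-- pv_equiv track=rewrite | github.com/pao-beep/Projects-and-leetcode | StringManipulation/RemovableIndices.py | getRemovableIndices
-- ===== SOURCE A (Python) =====
-- def getRemovableIndices(str1, str2):
--     if len(str1) != len(str2) + 1:
--         return [-1]
--
--     result = []
--     n = len(str2)
--     i = 0
--
--     # Find the first differing character
--     while i < n and str1[i] == str2[i]:
--         i += 1
--
--     # The extra character could be at position i in str1
--     # Check if str1[i+1:] matches str2[i:]
--     if str1[i+1:] == str2[i:]:
--         result.append(i)
--
--     # Also check if the extra character is after position i
--     # So we check if str1[i:] matches str2[i+1:] (but since str2 is shorter, we adjust)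
--     # Actually, we should check if str1[i+1:] matches str2[i:]
--     # But we already did that above. To find other possible positions, we need to look further
--
--     # Now check if there are other positions where the extra character could be
--     # For example, if the strings are "abdgggda" and "abdggda", the first difference is at position 3
--     # We need to check if any 'g' can be removed (positions 3,4,5)
--     # So we need to find all consecutive same characters at the point of difference
--
--     if i < n and str1[i+1] == str2[i]:
--         # The extra character is str1[i], but there might be multiple consecutive same characters
--         char = str2[i]
--         j = i
--         while j < len(str1) and str1[j] == char:
--             if str1[:j] + str1[j+1:] == str2:
--                 result.append(j)
--             j += 1
--
--     if not result:
--         return [-1]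
--     return sorted(result)
-- ===== SOURCE B (Python) =====
-- def getRemovableIndices(str1, str2):
--     if len(str1) != len(str2) + 1:
--         return [-1]
--     p1 = p2 = 0
--     removed = -1
--     while p2 < len(str2):
--         if str1[p1] == str2[p2]:
--             p1 += 1
--             p2 += 1
--         elif removed == -1:
--             removed = p1
--             p1 += 1
--         else:
--             return [-1]
--     if removed == -1:
--         removed = len(str2)
--     return [removed]
-- ===== Notes on version B (the rewrite author's own statement) =====
-- stated objective: simpler
-- what changed: Replaces A's find-first-mismatch loop plus slice-building equality checks (and its dead consecutive-duplicates scan) by a single two-pointer pass that skips at most one character of str1 and carries a 'removed' index.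
import Mathlib
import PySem

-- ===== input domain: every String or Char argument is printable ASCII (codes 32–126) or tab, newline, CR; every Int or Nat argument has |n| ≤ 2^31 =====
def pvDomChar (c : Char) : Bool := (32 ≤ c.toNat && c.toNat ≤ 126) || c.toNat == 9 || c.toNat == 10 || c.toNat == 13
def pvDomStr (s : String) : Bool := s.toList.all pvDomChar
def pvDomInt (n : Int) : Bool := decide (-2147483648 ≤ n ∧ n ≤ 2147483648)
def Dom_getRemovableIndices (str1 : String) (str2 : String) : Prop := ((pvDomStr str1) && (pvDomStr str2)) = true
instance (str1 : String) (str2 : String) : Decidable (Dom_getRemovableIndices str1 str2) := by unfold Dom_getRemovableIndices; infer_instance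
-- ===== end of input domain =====

-- B replaces A's first-mismatch loop + slice equality checks (and its never-executing
-- duplicate scan) by one two-pointer pass with a skip flag; objective: simpler.

-- ===== PORT A =====

-- 'while i < n and str1[i] == str2[i]: i += 1' — the obvious recursion over the two
-- character lists (the loop stops when str2 is exhausted, i.e. i = n); returns i.
def pvA_firstDiff : List Char → List Char → Nat
  | a :: as, b :: bs => if a = b then pvA_firstDiff as bs + 1 else 0
  | _, _ => 0

-- 'j = i; while j < len(str1) and str1[j] == char: if str1[:j]+str1[j+1:] == str2: append j; j += 1'
-- fuel = len(str1) bounds the iterations (j only increases; loop exits once j = len(str1)).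
def pvA_loop2 (l1 l2 : List Char) (c : Char) : Nat → Nat → List Int
  | 0, _ => []
  | fuel + 1, j =>
    if j < l1.length ∧ PySem.List.pyGet? l1 (j : Int) = some c then
      (if PySem.List.slice l1 none (some (j : Int)) ++
          PySem.List.slice l1 (some ((j : Int) + 1)) none = l2
       then [(j : Int)] else []) ++ pvA_loop2 l1 l2 c fuel (j + 1)
    else []

def getRemovableIndices (str1 : String) (str2 : String) : List Int :=
  let l1 := str1.toList
  let l2 := str2.toList
  if l1.length ≠ l2.length + 1 then [-1]
  else
    let n := l2.length
    let i := pvA_firstDiff l1 l2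
    -- if str1[i+1:] == str2[i:]: result.append(i)
    let result : List Int :=
      if PySem.List.slice l1 (some ((i : Int) + 1)) none =
         PySem.List.slice l2 (some (i : Int)) none
      then [(i : Int)] else []
    -- if i < n and str1[i+1] == str2[i]:  (both indices in range when i < n, as n + 1 = len(str1))
    let result :=
      if i < n ∧ PySem.List.pyGet? l1 ((i : Int) + 1) = PySem.List.pyGet? l2 (i : Int) then
        match PySem.List.pyGet? l2 (i : Int) with   -- char = str2[i]; some since i < n
        | some c => result ++ pvA_loop2 l1 l2 c l1.length i
        | none => result                            -- unreachable: i < n keeps the index in range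
      else result
    if result = [] then [-1] else PySem.List.sorted result (fun x => x) false

-- ===== PORT B =====

-- the two-pointer loop of Source B: the two list arguments are the suffixes of str1/str2 at
-- p1/p2; n = len(str2).  The ([], _ :: _) case only makes the recursion total — it is
-- unreachable because len(str1) = len(str2) + 1 and p1 ≤ p2 + 1 throughout.
def pvB_loop (n : Nat) : List Char → List Char → Int → Nat → List Int
  | a :: as, b :: bs, removed, p1 =>
    if a = b then pvB_loop n as bs removed (p1 + 1)
    else if removed = -1 then pvB_loop n as (b :: bs) (p1 : Int) (p1 + 1)
    else [-1]
  | _, [], removed, _ => if removed = -1 then [(n : Int)] else [removed]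
  | [], _ :: _, _, _ => [-1]

def getRemovableIndices_alt (str1 : String) (str2 : String) : List Int :=
  let l1 := str1.toList
  let l2 := str2.toList
  if l1.length ≠ l2.length + 1 then [-1]
  else pvB_loop l2.length l1 l2 (-1) 0

-- ===== PRECONDITION & SPEC =====
def Spec_getRemovableIndices (str1 : String) (str2 : String) (out : List Int) : Prop := out = getRemovableIndices_alt str1 str2
instance (str1 : String) (str2 : String) (out : List Int) : Decidable (Spec_getRemovableIndices str1 str2 out) := by unfold Spec_getRemovableIndices; infer_instance

-- ===== CLAIM (what is proved, stated in full; the proofs are below) =====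
def Claim_equal_getRemovableIndices : Prop := ∀ (str1 : String) (str2 : String), Dom_getRemovableIndices str1 str2 → Spec_getRemovableIndices str1 str2 (getRemovableIndices str1 str2)

-- ===== LEMMAS AND PROOFS =====

-- at the first-difference index (when it is inside str2) the characters really differ
lemma firstDiff_ne : ∀ (l1 l2 : List Char), pvA_firstDiff l1 l2 < l2.length →
    l1[pvA_firstDiff l1 l2]? ≠ l2[pvA_firstDiff l1 l2]? := by
  intro l1 l2
  induction l2 generalizing l1 with
  | nil => simp
  | cons b bs ih =>
    cases l1 with
    | nil => intro _; simp [pvA_firstDiff]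
    | cons a as =>
      by_cases hab : a = b
      · simp only [pvA_firstDiff, if_pos hab, List.length_cons]
        intro h
        simpa using ih as (by omega)
      · simp [pvA_firstDiff, hab]

-- A's second while loop exits immediately when str1[j] ≠ char
lemma loop2_nil (l1 l2 : List Char) (c : Char) (j : Nat)
    (h : PySem.List.pyGet? l1 (j : Int) ≠ some c) :
    ∀ fuel, pvA_loop2 l1 l2 c fuel j = [] := by
  intro fuel
  cases fuel with
  | zero => rfl
  | succ f =>
    have hc : ¬ (j < l1.length ∧ PySem.List.pyGet? l1 (j : Int) = some c) :=
      fun hc => h hc.2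
    simp only [pvA_loop2, if_neg hc]

-- the second phase of B's loop (a mismatch already skipped): lockstep comparison of
-- equal-length suffixes
lemma pvB_loop_skipped : ∀ (s2 s1 : List Char) (n : Nat) (r : Int) (p1 : Nat),
    s1.length = s2.length → r ≠ -1 →
    pvB_loop n s1 s2 r p1 = if s1 = s2 then [r] else [-1] := by
  intro s2
  induction s2 with
  | nil =>
    intro s1 n r p1 hlen hr
    cases s1 with
    | nil => simp [pvB_loop, hr]
    | cons a as => simp at hlen
  | cons b bs ih =>
    intro s1 n r p1 hlen hr
    cases s1 with
    | nil => simp at hlen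
    | cons a as =>
      by_cases hab : a = b
      · rw [pvB_loop, if_pos hab, ih as n r (p1 + 1) (by simpa using hlen) hr]
        simp [hab]
      · rw [pvB_loop, if_neg hab, if_neg hr]
        simp [hab]

-- B's loop computes: first-mismatch index i, then [p1+i] iff the remaining tails match
lemma pvB_loop_main : ∀ (l2 l1 : List Char) (n p1 : Nat),
    l1.length = l2.length + 1 → n = p1 + l2.length →
    pvB_loop n l1 l2 (-1) p1 =
      (if List.drop (pvA_firstDiff l1 l2 + 1) l1 = List.drop (pvA_firstDiff l1 l2) l2
       then [((p1 + pvA_firstDiff l1 l2 : Nat) : Int)] else [-1]) := by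
  intro l2
  induction l2 with
  | nil =>
    intro l1 n p1 hlen hn
    match l1, hlen with
    | [a], _ => simp [pvB_loop, pvA_firstDiff, hn]
  | cons b bs ih =>
    intro l1 n p1 hlen hn
    cases l1 with
    | nil => simp at hlen
    | cons a as =>
      by_cases hab : a = b
      · rw [pvB_loop, if_pos hab,
          ih as n (p1 + 1) (by simpa using hlen) (by simp at hn ⊢; omega)]
        simp only [pvA_firstDiff, if_pos hab]
        have : (p1 + 1) + pvA_firstDiff as bs = p1 + (pvA_firstDiff as bs + 1) := by omega
        rw [this]
        rfl
      · rw [pvB_loop, if_neg hab, if_pos rfl,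
          pvB_loop_skipped (b :: bs) as n (p1 : Int) (p1 + 1)
            (by simpa using hlen) (by omega)]
        simp only [pvA_firstDiff, if_neg hab, List.drop_succ_cons, List.drop_zero, Nat.add_zero]

-- ===== VERDICT (by name: the statement is the Claim_ definition above) =====
theorem getRemovableIndices_spec : Claim_equal_getRemovableIndices := by
  intro str1 str2 _
  unfold Spec_getRemovableIndices getRemovableIndices getRemovableIndices_alt
  set l1 := str1.toList with hl1
  set l2 := str2.toList with hl2
  by_cases hlen : l1.length = l2.length + 1
  · rw [if_neg (by omega : ¬ l1.length ≠ l2.length + 1),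
      if_neg (by omega : ¬ l1.length ≠ l2.length + 1)]
    set i := pvA_firstDiff l1 l2 with hi
    -- the slice conditions are tail-drop equalities
    have hs1 : PySem.List.slice l1 (some ((i : Int) + 1)) none = List.drop (i + 1) l1 := by
      rw [show ((i : Int) + 1) = ((i + 1 : Nat) : Int) by push_cast; ring]
      exact PySem.List.slice_from_natCast l1 (i + 1)
    have hs2 : PySem.List.slice l2 (some (i : Int)) none = List.drop i l2 :=
      PySem.List.slice_from_natCast l2 i
    -- the second if of A appends nothing
    have hsecond : ∀ (result : List Int),
        (if i < l2.length ∧ PySem.List.pyGet? l1 ((i : Int) + 1) = PySem.List.pyGet? l2 (i : Int) then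
          match PySem.List.pyGet? l2 (i : Int) with
          | some c => result ++ pvA_loop2 l1 l2 c l1.length i
          | none => result
        else result) = result := by
      intro result
      by_cases hc : i < l2.length ∧
          PySem.List.pyGet? l1 ((i : Int) + 1) = PySem.List.pyGet? l2 (i : Int)
      · rw [if_pos hc]
        have hne : PySem.List.pyGet? l1 (i : Int) ≠ PySem.List.pyGet? l2 (i : Int) := by
          rw [PySem.List.pyGet?_natCast, PySem.List.pyGet?_natCast]
          exact firstDiff_ne l1 l2 hc.1
        cases hget : PySem.List.pyGet? l2 (i : Int) with
        | none => rfl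
        | some c =>
          show result ++ pvA_loop2 l1 l2 c l1.length i = result
          rw [loop2_nil l1 l2 c i (by rw [hget] at hne; exact hne) l1.length,
            List.append_nil]
      · rw [if_neg hc]
    dsimp only
    rw [hsecond, hs1, hs2]
    rw [pvB_loop_main l2 l1 l2.length 0 hlen (by omega)]
    by_cases hdrop : List.drop (i + 1) l1 = List.drop i l2
    · rw [if_pos hdrop, if_pos hdrop]
      simp only [Nat.zero_add]
      rw [if_neg (List.cons_ne_nil (i : Int) [])]
      exact PySem.List.sorted_eq_self_of_pairwise _ _ (List.pairwise_singleton _ _)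
    · rw [if_neg hdrop, if_neg hdrop, if_pos rfl]
  · rw [if_pos (by omega : l1.length ≠ l2.length + 1),
      if_pos (by omega : l1.length ≠ l2.length + 1)]
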